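-- pv_equiv track=rewrite | github.com/BraydenParish/GM-Simulator | gm-sim/app/services/contracts.py | _build_dead_money_schedule
-- ===== SOURCE A (Python) =====
-- from typing import Dict, List, Optional
--
-- def _build_dead_money_schedule(
--     base_salary: "OrderedDict[int, int]",
--     proration_schedule: Dict[int, int],
--     guarantees: Dict[int, int],
--     end_year: int,
--     void_years: int,
-- ) -> Dict[int, int]:
--     all_proration_years = sorted(proration_schedule)
--     dead_money: Dict[int, int] = {}
--     for year in base_salary:
--         remaining_proration = sum(
--             proration_schedule[pr_year] for pr_year in all_proration_years if pr_year >= year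
--         )
--         dead_money[year] = guarantees.get(year, 0) + remaining_proration
--     for idx in range(1, void_years + 1):
--         year = end_year + idx
--         remaining_proration = sum(
--             proration_schedule[pr_year] for pr_year in all_proration_years if pr_year >= year
--         )
--         dead_money[year] = remaining_proration
--     return dead_money
-- ===== SOURCE B (Python) =====
-- from typing import Dict
--
--
-- def _bisect_left(keys, x):
--     lo, hi = 0, len(keys)
--     while lo < hi:
--         mid = (lo + hi) // 2
--         if keys[mid] < x:
--             lo = mid + 1
--         else:
--             hi = mid
--     return lo
--
--
-- def _build_dead_money_schedule(
--     base_salary: "OrderedDict[int, int]",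
--     proration_schedule: Dict[int, int],
--     guarantees: Dict[int, int],
--     end_year: int,
--     void_years: int,
-- ) -> Dict[int, int]:
--     items = sorted(proration_schedule.items(), key=lambda kv: kv[0])
--     keys = [k for k, _ in items]
--     # prefix[i] = total proration of items[:i]; remaining at year = total - prefix[bisect]
--     prefix = [0]
--     for _, value in items:
--         prefix.append(prefix[-1] + value)
--     total = prefix[-1]
--     # stage the queries first: base-salary years carry their guarantee, void years carry 0
--     queries = [(year, guarantees.get(year, 0)) for year in base_salary]
--     queries += [(end_year + idx, 0) for idx in range(1, void_years + 1)]
--     dead_money: Dict[int, int] = {}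
--     for year, extra in queries:
--         dead_money[year] = extra + (total - prefix[_bisect_left(keys, year)])
--     return dead_money
-- ===== Notes on version B (the rewrite author's own statement) =====
-- stated objective: faster
-- what changed: B sorts the proration items once and precomputes forward prefix sums (remaining proration at a year = total - prefix[bisect_left]), stages all queried years (base-salary years with their guarantee, void years with 0) into one list, and fills the result in a single loop with a binary search per year instead of A's full rescan of the sorted proration years for every year.
import Mathlib
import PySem

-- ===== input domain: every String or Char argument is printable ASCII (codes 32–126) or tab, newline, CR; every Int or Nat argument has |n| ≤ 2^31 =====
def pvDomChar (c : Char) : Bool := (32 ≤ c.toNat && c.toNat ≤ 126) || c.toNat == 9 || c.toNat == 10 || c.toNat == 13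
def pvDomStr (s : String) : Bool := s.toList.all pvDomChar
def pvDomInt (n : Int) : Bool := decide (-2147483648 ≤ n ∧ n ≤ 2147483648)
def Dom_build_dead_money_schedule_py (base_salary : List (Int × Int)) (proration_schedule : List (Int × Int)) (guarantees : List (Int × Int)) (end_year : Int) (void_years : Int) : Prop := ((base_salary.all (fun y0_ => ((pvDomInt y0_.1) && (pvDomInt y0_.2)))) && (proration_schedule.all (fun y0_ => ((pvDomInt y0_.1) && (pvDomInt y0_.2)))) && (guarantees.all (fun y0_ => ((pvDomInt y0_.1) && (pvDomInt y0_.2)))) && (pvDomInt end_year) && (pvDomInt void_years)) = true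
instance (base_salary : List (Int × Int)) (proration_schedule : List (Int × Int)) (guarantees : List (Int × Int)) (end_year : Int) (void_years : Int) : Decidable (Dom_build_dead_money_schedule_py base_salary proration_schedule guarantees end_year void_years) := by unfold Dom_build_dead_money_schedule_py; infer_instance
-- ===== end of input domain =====

-- B sorts the proration items once, precomputes forward prefix sums (remaining = total -
-- prefix[bisect_left]), stages all queried years into one list and fills the result in a
-- single loop with a binary search per year, instead of A's per-year rescan.

-- ===== PORT A =====
-- remaining_proration for a given year: sum over sorted proration years ≥ year
-- (the generator expression of A, as a named helper; `pr >= year` written `year ≤ pr`)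
def pvRemA (ps : List (Int × Int)) (year : Int) : Int :=
  (PySem.List.sorted (PySem.Dict.mk ps).keys (fun k => k)).foldl
    (fun s pr => if year ≤ pr then s + (PySem.Dict.mk ps).getD pr 0 else s) 0

def build_dead_money_schedule_py (base_salary : List (Int × Int)) (proration_schedule : List (Int × Int)) (guarantees : List (Int × Int)) (end_year : Int) (void_years : Int) : List (Int × Int) :=
  -- first loop: over base_salary years
  let dm := base_salary.foldl
    (fun dm kv =>
      dm.insert kv.1 ((PySem.Dict.mk guarantees).getD kv.1 0 + pvRemA proration_schedule kv.1))
    PySem.Dict.empty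
  -- second loop: void years end_year+1 .. end_year+void_years
  let dm := (PySem.List.pyRange 1 (void_years + 1) 1).foldl
    (fun dm idx => dm.insert (end_year + idx) (pvRemA proration_schedule (end_year + idx))) dm
  dm.items

-- ===== PORT B =====
-- B's prefix loop: prefix = [0]; for _, value in items: prefix.append(prefix[-1] + value)
def pvPrefix (items : List (Int × Int)) : List Int :=
  items.foldl (fun acc kv => acc ++ [PySem.List.pyGetD acc (-1) 0 + kv.2]) [0]

def build_dead_money_schedule_py_alt (base_salary : List (Int × Int)) (proration_schedule : List (Int × Int)) (guarantees : List (Int × Int)) (end_year : Int) (void_years : Int) : List (Int × Int) :=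
  let items := PySem.List.sorted proration_schedule (fun kv => kv.1)
  let keys := items.map (fun kv => kv.1)
  let pref := pvPrefix items
  let total := PySem.List.pyGetD pref (-1) 0
  -- staged queries: base-salary years with their guarantee, then void years with 0
  let queries := base_salary.map (fun kv => (kv.1, (PySem.Dict.mk guarantees).getD kv.1 0))
      ++ (PySem.List.pyRange 1 (void_years + 1) 1).map (fun idx => (end_year + idx, (0 : Int)))
  (queries.foldl
    (fun dm q =>
      dm.insert q.1 (q.2 + (total - pref.getD (PySem.List.bisectLeft keys q.1) 0)))
    PySem.Dict.empty).items

-- ===== PRECONDITION & SPEC =====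
-- Pre_ excludes only association lists with a duplicated proration key: they do not represent
-- a Python dict (A's proration_schedule argument is a dict, whose keys are necessarily distinct).
def Pre_build_dead_money_schedule_py (base_salary : List (Int × Int)) (proration_schedule : List (Int × Int)) (guarantees : List (Int × Int)) (end_year : Int) (void_years : Int) : Prop :=
  (proration_schedule.map Prod.fst).Nodup
instance (base_salary : List (Int × Int)) (proration_schedule : List (Int × Int)) (guarantees : List (Int × Int)) (end_year : Int) (void_years : Int) : Decidable (Pre_build_dead_money_schedule_py base_salary proration_schedule guarantees end_year void_years) := by unfold Pre_build_dead_money_schedule_py; infer_instance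

def pvWitness_build_dead_money_schedule_py : (List (Int × Int)) × (List (Int × Int)) × (List (Int × Int)) × Int × Int :=
  ([(2024, 100)], [(2024, 50), (2025, 50)], [(2024, 30)], 2025, 2)

def Spec_build_dead_money_schedule_py (base_salary : List (Int × Int)) (proration_schedule : List (Int × Int)) (guarantees : List (Int × Int)) (end_year : Int) (void_years : Int) (out : List (Int × Int)) : Prop := out = build_dead_money_schedule_py_alt base_salary proration_schedule guarantees end_year void_years
instance (base_salary : List (Int × Int)) (proration_schedule : List (Int × Int)) (guarantees : List (Int × Int)) (end_year : Int) (void_years : Int) (out : List (Int × Int)) : Decidable (Spec_build_dead_money_schedule_py base_salary proration_schedule guarantees end_year void_years out) := by unfold Spec_build_dead_money_schedule_py; infer_instance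

-- ===== CLAIM (what is proved, stated in full; the proofs are below) =====
def Claim_equal_build_dead_money_schedule_py : Prop := ∀ (base_salary : List (Int × Int)) (proration_schedule : List (Int × Int)) (guarantees : List (Int × Int)) (end_year : Int) (void_years : Int), Dom_build_dead_money_schedule_py base_salary proration_schedule guarantees end_year void_years → Pre_build_dead_money_schedule_py base_salary proration_schedule guarantees end_year void_years → Spec_build_dead_money_schedule_py base_salary proration_schedule guarantees end_year void_years (build_dead_money_schedule_py base_salary proration_schedule guarantees end_year void_years)

-- ===== LEMMAS AND PROOFS =====

-- B's answer at a year, as a standalone function (proof-side abbreviation of B's arithmetic)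
def pvRemB (ps : List (Int × Int)) (year : Int) : Int :=
  PySem.List.pyGetD (pvPrefix (PySem.List.sorted ps (fun kv => kv.1))) (-1) 0
    - (pvPrefix (PySem.List.sorted ps (fun kv => kv.1))).getD
        (PySem.List.bisectLeft
          ((PySem.List.sorted ps (fun kv => kv.1)).map (fun kv => kv.1)) year) 0

-- B's port, reshaped into A's two-loop shape (pure list algebra: foldl over ++ and map)
theorem pv_alt_shape (bs ps gs : List (Int × Int)) (ey vy : Int) :
    build_dead_money_schedule_py_alt bs ps gs ey vy =
      ((PySem.List.pyRange 1 (vy + 1) 1).foldl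
        (fun dm idx => dm.insert (ey + idx) (pvRemB ps (ey + idx)))
        (bs.foldl
          (fun dm kv => dm.insert kv.1 ((PySem.Dict.mk gs).getD kv.1 0 + pvRemB ps kv.1))
          PySem.Dict.empty)).items := by
  unfold build_dead_money_schedule_py_alt pvRemB
  simp only [List.foldl_append, List.foldl_map, zero_add]

-- running sums of the item values starting from s
def pvPartials : List (Int × Int) → Int → List Int
  | [], _ => []
  | kv :: tl, s => (s + kv.2) :: pvPartials tl (s + kv.2)

theorem pv_length_partials (items : List (Int × Int)) (s : Int) :
    (pvPartials items s).length = items.length := by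
  induction items generalizing s with
  | nil => rfl
  | cons kv tl ih => simp [pvPartials, ih]

theorem pv_fold_prefix (items : List (Int × Int)) (acc : List Int) :
    items.foldl (fun acc kv => acc ++ [PySem.List.pyGetD acc (-1) 0 + kv.2]) acc
      = acc ++ pvPartials items (PySem.List.pyGetD acc (-1) 0) := by
  induction items generalizing acc with
  | nil => simp [pvPartials]
  | cons kv tl ih =>
    simp only [List.foldl_cons, ih, pvPartials, PySem.List.pyGetD_neg_one_append_singleton,
      List.append_assoc, List.singleton_append]

theorem pv_prefix_eq (items : List (Int × Int)) :
    pvPrefix items = 0 :: pvPartials items 0 := by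
  unfold pvPrefix
  rw [pv_fold_prefix]
  rfl

theorem pv_partials_getD (items : List (Int × Int)) (s : Int) (i : Nat)
    (hi : i < items.length) :
    (pvPartials items s).getD i 0 = s + ((items.take (i + 1)).map (fun kv => kv.2)).sum := by
  induction items generalizing s i with
  | nil => simp at hi
  | cons kv tl ih =>
    cases i with
    | zero => simp [pvPartials]
    | succ j =>
      have hj : j < tl.length := by simpa using hi
      simp only [pvPartials, List.getD_cons_succ, List.take_succ_cons, List.map_cons,
        List.sum_cons]
      rw [ih (s + kv.2) j hj]
      ring

theorem pv_prefix_getD (items : List (Int × Int)) (i : Nat) (hi : i ≤ items.length) :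
    (pvPrefix items).getD i 0 = ((items.take i).map (fun kv => kv.2)).sum := by
  rw [pv_prefix_eq]
  cases i with
  | zero => simp
  | succ j =>
    have hj : j < items.length := by omega
    rw [List.getD_cons_succ, pv_partials_getD items 0 j hj]
    simp

theorem pv_prefix_last (items : List (Int × Int)) :
    PySem.List.pyGetD (pvPrefix items) (-1) 0 = (items.map (fun kv => kv.2)).sum := by
  have hne : pvPrefix items ≠ [] := by rw [pv_prefix_eq]; simp
  rw [PySem.List.pyGetD_neg_one (pvPrefix items) 0 hne, List.getLast_eq_getElem]
  have hlen : (pvPrefix items).length = items.length + 1 := by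
    rw [pv_prefix_eq]; simp [pv_length_partials]
  have h1 : (pvPrefix items).length - 1 = items.length := by omega
  rw [← List.getD_eq_getElem (pvPrefix items) 0 (by omega)]
  rw [h1, pv_prefix_getD items items.length le_rfl, List.take_length]

-- dict lookup on a duplicate-free association list returns the stored value
theorem pv_getD_mk_of_mem (ps : List (Int × Int)) (k v : Int)
    (hnd : (ps.map Prod.fst).Nodup) (hmem : (k, v) ∈ ps) :
    (PySem.Dict.mk ps).getD k 0 = v := by
  induction ps with
  | nil => cases hmem
  | cons hd tl ih =>
    obtain ⟨k1, v1⟩ := hd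
    simp only [List.map_cons, List.nodup_cons] at hnd
    rcases List.mem_cons.mp hmem with h | h
    · rw [Prod.mk.injEq] at h
      simp [PySem.Dict.getD, PySem.Dict.get?_mk_cons, h.1, h.2]
    · have hk : (k1 == k) = false := by
        simp only [beq_eq_false_iff_ne]
        intro he
        exact hnd.1 (he ▸ List.mem_map_of_mem h)
      simp only [PySem.Dict.getD, PySem.Dict.get?_mk_cons, hk]
      exact ih hnd.2 h

-- the key-sorted items are strictly increasing in key, when keys are distinct
theorem pv_sorted_pairwise_lt (ps : List (Int × Int)) (hnd : (ps.map Prod.fst).Nodup) :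
    (PySem.List.sorted ps (fun kv => kv.1)).Pairwise (fun a b => a.1 < b.1) := by
  have h1 : (PySem.List.sorted ps (fun kv => kv.1)).Pairwise (fun a b => a.1 ≤ b.1) :=
    PySem.List.sorted_pairwise ps (fun kv => kv.1)
  have h2 : ((PySem.List.sorted ps (fun kv => kv.1)).map (fun kv => kv.1)).Nodup :=
    (((PySem.List.sorted_perm ps (fun kv => kv.1) false).map (fun kv : Int × Int => kv.1)).nodup_iff).mpr hnd
  have h2' : (PySem.List.sorted ps (fun kv => kv.1)).Pairwise
      (fun a b : Int × Int => a.1 ≠ b.1) := by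
    rw [← List.pairwise_map (f := fun kv : Int × Int => kv.1)]
    exact h2
  exact (h1.and h2').imp (fun h => lt_of_le_of_ne h.1 h.2)

-- sorted keys = keys of the key-sorted items, when keys are distinct
theorem pv_sorted_keys (ps : List (Int × Int)) (hnd : (ps.map Prod.fst).Nodup) :
    PySem.List.sorted (ps.map (fun x => x.1)) (fun k => k)
      = (PySem.List.sorted ps (fun kv => kv.1)).map (fun kv => kv.1) := by
  apply PySem.List.sorted_eq_of_perm_of_pairwise_lt
  · exact ((PySem.List.sorted_perm ps (fun kv => kv.1) false).map (fun x : Int × Int => x.1))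
  · rw [List.pairwise_map]
    exact pv_sorted_pairwise_lt ps hnd

-- a fold that adds nothing
theorem pv_foldl_none (year : Int) (l : List (Int × Int)) (s : Int)
    (h : ∀ kv ∈ l, ¬ year ≤ (kv : Int × Int).1) :
    l.foldl (fun s kv => if year ≤ kv.1 then s + kv.2 else s) s = s := by
  induction l generalizing s with
  | nil => rfl
  | cons hd tl ih =>
    have hhd := h hd (List.mem_cons_self ..)
    simp only [List.foldl_cons, if_neg hhd]
    exact ih s (fun kv hm => h kv (List.mem_cons_of_mem _ hm))

-- a fold that adds everything
theorem pv_foldl_all (year : Int) (l : List (Int × Int)) (s : Int)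
    (h : ∀ kv ∈ l, year ≤ (kv : Int × Int).1) :
    l.foldl (fun s kv => if year ≤ kv.1 then s + kv.2 else s) s
      = s + (l.map (fun kv => kv.2)).sum := by
  induction l generalizing s with
  | nil => simp
  | cons hd tl ih =>
    have hhd := h hd (List.mem_cons_self ..)
    simp only [List.foldl_cons, if_pos hhd, List.map_cons, List.sum_cons]
    rw [ih (s + hd.2) (fun kv hm => h kv (List.mem_cons_of_mem _ hm))]
    ring

-- core: the filtered fold over a strictly key-sorted list is the value-sum of the
-- tail the bisect index drops to
theorem pv_fold_eq_drop (L : List (Int × Int)) (year : Int)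
    (hpw : L.Pairwise (fun a b => a.1 < b.1)) :
    L.foldl (fun s kv => if year ≤ kv.1 then s + kv.2 else s) 0
      = ((L.drop (PySem.List.bisectLeft (L.map (fun kv => kv.1)) year)).map
          (fun kv => kv.2)).sum := by
  have hle : (L.map (fun kv => kv.1)).Pairwise (fun a b : Int => a ≤ b) := by
    rw [List.pairwise_map]
    exact hpw.imp le_of_lt
  obtain ⟨hlen, hlt, hge⟩ := PySem.List.bisectLeft_spec (L.map (fun kv => kv.1)) year hle
  set i := PySem.List.bisectLeft (L.map (fun kv => kv.1)) year with hidef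
  have hlenk : (L.map (fun kv => kv.1)).length = L.length := List.length_map ..
  have hA : ∀ kv ∈ L.take i, ¬ year ≤ (kv : Int × Int).1 := by
    intro kv hm
    obtain ⟨j, hj, hEq⟩ := List.getElem_of_mem hm
    have hjlt : j < i := by rw [List.length_take] at hj; omega
    have hjL : j < L.length := by rw [List.length_take] at hj; omega
    have hk := hlt j (by omega) hjlt
    rw [List.getElem_map] at hk
    rw [List.getElem_take] at hEq
    rw [hEq] at hk
    omega
  have hB : ∀ kv ∈ L.drop i, year ≤ (kv : Int × Int).1 := by
    intro kv hm
    obtain ⟨j, hj, hEq⟩ := List.getElem_of_mem hm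
    have hjL : i + j < L.length := by rw [List.length_drop] at hj; omega
    have hk := hge (i + j) (by omega) (by omega)
    rw [List.getElem_map] at hk
    rw [List.getElem_drop] at hEq
    rw [hEq] at hk
    exact hk
  conv_lhs => rw [← List.take_append_drop i L]
  rw [List.foldl_append, pv_foldl_none year (L.take i) 0 hA,
    pv_foldl_all year (L.drop i) 0 hB]
  simp

-- A's per-year rescan equals B's total-minus-prefix at the bisect index
theorem pv_rem_eq (ps : List (Int × Int)) (hnd : (ps.map Prod.fst).Nodup) (year : Int) :
    pvRemA ps year = pvRemB ps year := by
  unfold pvRemA pvRemB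
  rw [PySem.Dict.keys_mk, pv_sorted_keys ps hnd, List.foldl_map]
  set L := PySem.List.sorted ps (fun kv => kv.1) with hL
  have hval : ∀ kv ∈ L, (PySem.Dict.mk ps).getD (kv : Int × Int).1 0 = kv.2 := by
    intro kv hm
    have hmem : kv ∈ ps := (PySem.List.mem_sorted ps (fun kv => kv.1) false kv).mp hm
    exact pv_getD_mk_of_mem ps kv.1 kv.2 hnd hmem
  have hcongr : L.foldl
      (fun s kv => if year ≤ (kv : Int × Int).1 then s + (PySem.Dict.mk ps).getD kv.1 0 else s) 0
      = L.foldl (fun s kv => if year ≤ kv.1 then s + kv.2 else s) 0 := by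
    apply PySem.List.foldl_congr_mem
    intro s kv hm
    rw [hval kv hm]
  rw [hcongr, pv_fold_eq_drop L year (pv_sorted_pairwise_lt ps hnd)]
  -- right-hand side: total - prefix[i] = sum of the dropped tail
  obtain ⟨hlen, _, _⟩ := PySem.List.bisectLeft_spec (L.map (fun kv => kv.1)) year
    (by rw [List.pairwise_map]; exact (pv_sorted_pairwise_lt ps hnd).imp le_of_lt)
  set i := PySem.List.bisectLeft (L.map (fun kv => kv.1)) year with hidef
  have hiL : i ≤ L.length := by rw [List.length_map] at hlen; omega
  rw [pv_prefix_last L, pv_prefix_getD L i hiL]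
  have hsplit : (L.map (fun kv => kv.2)).sum
      = ((L.take i).map (fun kv => kv.2)).sum + ((L.drop i).map (fun kv => kv.2)).sum := by
    conv_lhs => rw [← List.take_append_drop i L]
    rw [List.map_append, List.sum_append]
  omega

-- ===== VERDICT (by name: the statement is the Claim_ definition above) =====
theorem build_dead_money_schedule_py_spec : Claim_equal_build_dead_money_schedule_py := by
  intro bs ps gs ey vy _ hpre
  unfold Spec_build_dead_money_schedule_py
  rw [pv_alt_shape]
  unfold build_dead_money_schedule_py
  simp only [pv_rem_eq ps hpre]
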